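-- pv_equiv track=rewrite | github.com/ShlyapaEx/algorithms_training | Яндекс. Тренировка алгоритмов 1.0/Домашнее задание по лекции 4/B. Number of word appearance.py | get_words_count
-- ===== SOURCE A (Python) =====
-- def get_words_count(text: str) -> list[int]:
--     cum_words_count = []
--     words_count = {}
--     words = text.split()
--
--     for word in words:
--         if word in words_count:
--             words_count[word] += 1
--         else:
--             words_count[word] = 0
--         cum_words_count.append(words_count[word])
--     return cum_words_count
-- ===== SOURCE B (Python) =====
-- def get_words_count(text: str) -> list[int]:
--     words = text.split()
--     return [words[:i].count(word) for i, word in enumerate(words)]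
-- ===== Notes on version B (the rewrite author's own statement) =====
-- stated objective: simpler
-- what changed: B replaces A's mutable counter dict with a one-line comprehension that counts each word's prior occurrences by re-counting the prefix words[:i].
import Mathlib
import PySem

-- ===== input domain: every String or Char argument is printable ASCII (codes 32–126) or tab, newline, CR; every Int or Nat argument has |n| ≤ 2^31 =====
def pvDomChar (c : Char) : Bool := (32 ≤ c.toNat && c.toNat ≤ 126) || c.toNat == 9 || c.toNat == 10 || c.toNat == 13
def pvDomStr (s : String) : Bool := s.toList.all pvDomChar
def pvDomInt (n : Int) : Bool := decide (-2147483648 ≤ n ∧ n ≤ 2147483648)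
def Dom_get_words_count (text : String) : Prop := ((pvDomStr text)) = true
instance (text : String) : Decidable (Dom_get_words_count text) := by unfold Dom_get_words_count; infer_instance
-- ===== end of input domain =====

-- B replaces A's running counter dict with a prefix re-count per word (simpler one-liner); return values proved equal.

-- ===== PORT A =====
-- the loop body: update the counter dict, append the stored count
def get_words_count (text : String) : List Int :=
  let words := PySem.Str.split₀ text
  (words.foldl
    (fun (st : List Int × PySem.Dict String Int) word =>
      let d :=
        if st.2.contains word then st.2.modify word 0 (· + 1)
        else st.2.insert word 0
      (st.1 ++ [d.getD word 0], d))
    ([], PySem.Dict.empty)).1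

-- ===== PORT B =====
def get_words_count_alt (text : String) : List Int :=
  let words := PySem.Str.split₀ text
  (PySem.List.enumerate words).map
    (fun p => ((PySem.List.slice words none (some p.1)).count p.2 : Int))

-- ===== PRECONDITION & SPEC =====
def Spec_get_words_count (text : String) (out : List Int) : Prop := out = get_words_count_alt text
instance (text : String) (out : List Int) : Decidable (Spec_get_words_count text out) := by unfold Spec_get_words_count; infer_instance

-- ===== CLAIM (what is proved, stated in full; the proofs are below) =====
def Claim_equal_get_words_count : Prop := ∀ (text : String), Dom_get_words_count text → Spec_get_words_count text (get_words_count text)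

-- ===== LEMMAS AND PROOFS =====

-- reference result: for each word of `rest`, the number of its occurrences in the prefix so far
def pvPriorCounts (pref rest : List String) : List Int :=
  match rest with
  | [] => []
  | w :: ws => ((pref.count w : Int)) :: pvPriorCounts (pref ++ [w]) ws

theorem pvFoldA (rest : List String) :
    ∀ (pref : List String) (acc : List Int) (d : PySem.Dict String Int),
    (∀ w, d.contains w = decide (w ∈ pref)) →
    (∀ w, w ∈ pref → d.getD w 0 = (pref.count w : Int) - 1) →
    (rest.foldl
      (fun (st : List Int × PySem.Dict String Int) word =>
        let d :=
          if st.2.contains word then st.2.modify word 0 (· + 1)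
          else st.2.insert word 0
        (st.1 ++ [d.getD word 0], d))
      (acc, d)).1 = acc ++ pvPriorCounts pref rest := by
  induction rest with
  | nil => intro pref acc d _ _; simp [pvPriorCounts]
  | cons w ws ih =>
    intro pref acc d hc hg
    simp only [List.foldl_cons, pvPriorCounts]
    by_cases hw : w ∈ pref
    · have hcw : d.contains w = true := by rw [hc]; simp [hw]
      simp only [hcw, if_true]
      have hval : (d.modify w 0 (· + 1)).getD w 0 = (pref.count w : Int) := by
        rw [PySem.Dict.getD_modify, if_pos rfl, hg w hw]; ring
      rw [hval, ih (pref ++ [w]) _ _ ?_ ?_]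
      · simp
      · intro x
        rw [PySem.Dict.contains_modify, hc]
        by_cases hx : x = w
        · subst hx; simp [hw]
        · have : (x == w) = false := by simpa using hx
          simp [this, hx]
      · intro x hx
        rw [PySem.Dict.getD_modify]
        by_cases hxw : x = w
        · subst hxw
          rw [if_pos rfl, hg x hw]
          simp [List.count_append]
        · rw [if_neg hxw]
          have hxp : x ∈ pref := by
            rcases List.mem_append.mp hx with h | h
            · exact h
            · simp at h; exact absurd h hxw
          rw [hg x hxp]
          have : (x == w) = false := by simpa using hxw
          have hwx : ¬ w = x := fun h => hxw h.symm
          simp [List.count_append, hwx]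
    · have hcw : d.contains w = false := by rw [hc]; simp [hw]
      simp only [hcw, Bool.false_eq_true, if_false]
      have hval : (d.insert w 0).getD w 0 = (0 : Int) := by
        rw [PySem.Dict.getD_insert, if_pos rfl]
      have hcnt : pref.count w = 0 := List.count_eq_zero.mpr hw
      rw [hval, ih (pref ++ [w]) _ _ ?_ ?_]
      · simp [hcnt]
      · intro x
        rw [PySem.Dict.contains_insert, hc]
        by_cases hx : x = w
        · subst hx; simp
        · have : (x == w) = false := by simpa using hx
          simp [this, hx]
      · intro x hx
        rw [PySem.Dict.getD_insert]
        by_cases hxw : x = w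
        · subst hxw
          rw [if_pos rfl]
          simp [List.count_append, hcnt]
        · rw [if_neg hxw]
          have hxp : x ∈ pref := by
            rcases List.mem_append.mp hx with h | h
            · exact h
            · simp at h; exact absurd h hxw
          rw [hg x hxp]
          have : (x == w) = false := by simpa using hxw
          have hwx : ¬ w = x := fun h => hxw h.symm
          simp [List.count_append, hwx]

-- B's enumerate-and-slice map also produces the prior counts
theorem pvMapB (rest : List String) :
    ∀ (pref : List String),
    (PySem.List.enumerate rest (pref.length : Int)).map
      (fun p => (((PySem.List.slice (pref ++ rest) none (some p.1)).count p.2 : Nat) : Int))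
      = pvPriorCounts pref rest := by
  induction rest with
  | nil => intro pref; simp [PySem.List.enumerate, pvPriorCounts]
  | cons w ws ih =>
    intro pref
    rw [PySem.List.enumerate_cons,
        show pref ++ w :: ws = (pref ++ [w]) ++ ws from by simp]
    simp only [List.map_cons, pvPriorCounts]
    refine List.cons_eq_cons.mpr ⟨?_, ?_⟩
    · rw [PySem.List.slice_to _ (Int.natCast_nonneg _), List.append_assoc,
        show ((pref.length : Int)).toNat = pref.length from Int.toNat_natCast _,
        List.take_left' rfl]
    · have h := ih (pref ++ [w])
      have hlen : ((pref ++ [w]).length : Int) = (pref.length : Int) + 1 := by simp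
      rw [hlen] at h
      exact h

theorem get_words_count_spec : Claim_equal_get_words_count := by
  intro text _
  unfold Spec_get_words_count get_words_count get_words_count_alt
  simp only
  rw [pvFoldA (PySem.Str.split₀ text) [] [] PySem.Dict.empty
      (by intro w; simp) (by intro w hw; simp at hw)]
  rw [← pvMapB (PySem.Str.split₀ text) []]
  simp
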